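-- pv_equiv track=rewrite | github.com/jamwomsoo/Algorithm_prac | binary_search/가사 검색_기출.py | solution
-- ===== SOURCE A (Python) =====
-- import bisect
--
-- def count_by_range(arr,left_value,right_value):
--     right = bisect.bisect_right(arr,right_value)
--     left = bisect.bisect_left(arr,left_value)
--     return right - left
--
-- def solution(words, queries):
--     answer = []
--     arr=[[] for _ in range(10001)]
--     reverse_arr=[[] for _ in range(10001)]
--
--     for word in words:
--         arr[len(word)].append(word)
--         reverse_arr[len(word)].append(word[::-1])
--     for i in range(10001):
--         arr[i].sort()
--         reverse_arr[i].sort()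
--     # fro?? 라는 쿼리일때, count_by_range()함수를 이용하여 froaa가 들어갈 위치(맨앞) frozz가 들어갈 위치(맨뒤)를 찾아서 fro?? 개수를 리턴
--     # ?가 접두사를 등장하면 비교가 불가능 하기 때문에 쿼리와 단어들을 뒤집어서 비교한다
--     for q in queries:
--         if q[0] == '?': # 접두사에 ? 있음
--             answer.append(count_by_range(reverse_arr[len(q)],q[::-1].replace('?','a'),q[::-1].replace('?','z')))
--         else:
--             answer.append(count_by_range(arr[len(q)], q.replace('?','a'), q.replace('?','z')))
--     return answer
-- ===== SOURCE B (Python) =====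
-- def solution(words, queries):
--     # Simpler: one linear count per query over the words, no buckets/sorting/bisect.
--     def wc_count(q):
--         n = len(q)
--         if q[0] == '?':
--             q = q[::-1]
--             keys = [w[::-1] for w in words if len(w) == n]
--         else:
--             keys = [w for w in words if len(w) == n]
--         lo, hi = q.replace('?', 'a'), q.replace('?', 'z')
--         return sum(lo <= k <= hi for k in keys)
--     return [wc_count(q) for q in queries]
-- ===== Notes on version B (the rewrite author's own statement) =====
-- stated objective: simpler
-- what changed: B drops A's 10001 sorted length-buckets and bisect binary searches and instead, per query, linearly counts the words of matching length whose (reversed, for a leading '?') key lies between q.replace('?','a') and q.replace('?','z').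
import Mathlib
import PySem

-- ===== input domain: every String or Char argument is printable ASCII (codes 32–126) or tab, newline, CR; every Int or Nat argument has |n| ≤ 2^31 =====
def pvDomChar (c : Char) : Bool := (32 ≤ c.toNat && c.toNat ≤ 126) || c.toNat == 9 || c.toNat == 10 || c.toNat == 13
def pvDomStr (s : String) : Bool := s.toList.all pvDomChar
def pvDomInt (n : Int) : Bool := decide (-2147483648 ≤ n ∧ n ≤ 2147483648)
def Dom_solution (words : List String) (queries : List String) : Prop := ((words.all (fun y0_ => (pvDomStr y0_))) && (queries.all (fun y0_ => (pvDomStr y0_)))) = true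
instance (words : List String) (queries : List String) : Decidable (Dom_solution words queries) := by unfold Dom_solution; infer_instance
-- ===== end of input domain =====

-- B replaces A's 10001 sorted length-buckets + bisect with a direct per-query linear count (simpler, not faster).


-- ===== PORT A =====
-- shared helper: Python's  s[::-1]
def pvRev (s : String) : String := (PySem.Str.slice? s none none (-1)).getD s

-- count_by_range(arr, left_value, right_value)
def pvCountByRange (arr : List String) (leftValue rightValue : String) : Int :=
  let right := PySem.List.bisectRight arr rightValue
  let left := PySem.List.bisectLeft arr leftValue
  (right : Int) - (left : Int)

def solution (words : List String) (queries : List String) : List Int :=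
  let answer : List Int := []
  let arr : List (List String) := (PySem.List.pyRange 0 10001 1).map (fun _ => [])
  let reverseArr : List (List String) := (PySem.List.pyRange 0 10001 1).map (fun _ => [])
  let st :=
    words.foldl (fun (st : List (List String) × List (List String)) word =>
      (PySem.List.pySetD st.1 (PySem.Str.len word)
          (PySem.List.pyGetD st.1 (PySem.Str.len word) [] ++ [word]),
       PySem.List.pySetD st.2 (PySem.Str.len word)
          (PySem.List.pyGetD st.2 (PySem.Str.len word) [] ++ [pvRev word]))) (arr, reverseArr)
  let st :=
    (PySem.List.pyRange 0 10001 1).foldl (fun (st : List (List String) × List (List String)) i =>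
      (PySem.List.pySetD st.1 i (PySem.List.sorted (PySem.List.pyGetD st.1 i []) (fun x => x) false),
       PySem.List.pySetD st.2 i (PySem.List.sorted (PySem.List.pyGetD st.2 i []) (fun x => x) false))) st
  queries.foldl (fun ans q =>
    if PySem.Str.pyGet? q 0 = some '?' then
      ans ++ [pvCountByRange (PySem.List.pyGetD st.2 (PySem.Str.len q) [])
                (PySem.Str.replace (pvRev q) "?" "a") (PySem.Str.replace (pvRev q) "?" "z")]
    else
      ans ++ [pvCountByRange (PySem.List.pyGetD st.1 (PySem.Str.len q) [])
                (PySem.Str.replace q "?" "a") (PySem.Str.replace q "?" "z")]) answer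

-- ===== PORT B =====
def pvWcCount (words : List String) (q : String) : Int :=
  let n := PySem.Str.len q
  if PySem.Str.pyGet? q 0 = some '?' then
    let q' := pvRev q
    let keys := (words.filter (fun w => PySem.Str.len w == n)).map pvRev
    let lo := PySem.Str.replace q' "?" "a"
    let hi := PySem.Str.replace q' "?" "z"
    ((keys.countP (fun k => decide (lo ≤ k ∧ k ≤ hi)) : Nat) : Int)
  else
    let keys := words.filter (fun w => PySem.Str.len w == n)
    let lo := PySem.Str.replace q "?" "a"
    let hi := PySem.Str.replace q "?" "z"
    ((keys.countP (fun k => decide (lo ≤ k ∧ k ≤ hi)) : Nat) : Int)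

def solution_alt (words : List String) (queries : List String) : List Int :=
  queries.map (pvWcCount words)

-- ===== PRECONDITION & SPEC =====
-- Pre_ excludes exactly the inputs where A raises IndexError: an empty query (q[0]),
-- or a word/query longer than 10000 (the bucket array has indices 0..10000).
def Pre_solution (words : List String) (queries : List String) : Prop :=
  (∀ w ∈ words, w.toList.length ≤ 10000) ∧
  (∀ q ∈ queries, q.toList ≠ [] ∧ q.toList.length ≤ 10000)
instance (words : List String) (queries : List String) : Decidable (Pre_solution words queries) := by
  unfold Pre_solution; infer_instance
def pvWitness_solution : List String × List String := (["frodo", "front", "frost", "frame", "kakao"], ["fro??", "????o", "?????", "abcde"])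

def Spec_solution (words : List String) (queries : List String) (out : List Int) : Prop := out = solution_alt words queries
instance (words : List String) (queries : List String) (out : List Int) : Decidable (Spec_solution words queries out) := by unfold Spec_solution; infer_instance

-- ===== CLAIM (what is proved, stated in full; the proofs are below) =====
def Claim_equal_solution : Prop := ∀ (words : List String) (queries : List String), Dom_solution words queries → Pre_solution words queries → Spec_solution words queries (solution words queries)

-- ===== LEMMAS AND PROOFS =====

-- a pair-state foldl splits into two independent foldls
theorem pv_foldl_pair {α β γ : Type} (l : List γ) (f : α → γ → α) (g : β → γ → β) (a : α) (b : β) :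
    l.foldl (fun st x => (f st.1 x, g st.2 x)) (a, b) = (l.foldl f a, l.foldl g b) := by
  induction l generalizing a b with
  | nil => rfl
  | cons x t ih => simp [List.foldl_cons, ih]

-- single-character replace is a map (helper for replace.go)
theorem pv_replace_go (o nw : Char) (fuel : Nat) :
    ∀ (l acc : List Char), l.length ≤ fuel →
      PySem.Chars.replace.go [o] [nw] fuel l acc
        = acc.reverse ++ l.map (fun c => if c = o then nw else c) := by
  induction fuel with
  | zero =>
    intro l acc h
    have : l = [] := List.eq_nil_of_length_eq_zero (Nat.le_zero.mp h)
    subst this; simp [PySem.Chars.replace.go]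
  | succ n ih =>
    intro l acc h
    cases l with
    | nil => simp [PySem.Chars.replace.go]
    | cons c t =>
      by_cases hc : c = o
      · subst hc
        have hpre : List.isPrefixOf [c] (c :: t) = true := by
          simp [List.isPrefixOf]
        simp only [PySem.Chars.replace.go, hpre, if_pos]
        rw [show List.drop [c].length (c :: t) = t from rfl,
            ih t _ (by simpa using Nat.le_of_succ_le_succ h)]
        simp
      · have hpre : List.isPrefixOf [o] (c :: t) = false := by
          simp [List.isPrefixOf]; exact fun h' => (hc h'.symm).elim
        simp only [PySem.Chars.replace.go, hpre]
        rw [ih t _ (by simpa using Nat.le_of_succ_le_succ h)]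
        simp [hc]

theorem pv_replace_single (s : String) (o nw : Char) :
    (PySem.Str.replace s (String.ofList [o]) (String.ofList [nw])).toList
      = s.toList.map (fun c => if c = o then nw else c) := by
  simp only [PySem.Str.replace, PySem.Chars.replace, String.toList_ofList]
  rw [if_neg (by simp), pv_replace_go o nw s.toList.length s.toList [] le_rfl]
  simp

-- the '?'→'a' bound is ≤ the '?'→'z' bound
theorem pv_lo_le_hi_chars : ∀ (cs : List Char),
    (cs.map (fun c => if c = '?' then 'a' else c)) ≤ (cs.map (fun c => if c = '?' then 'z' else c)) := by
  intro cs
  induction cs with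
  | nil => exact le_refl _
  | cons c t ih =>
    by_cases hc : c = '?'
    · subst hc
      simp only [List.map_cons]
      exact le_of_lt (List.Lex.rel (by decide))
    · simp only [List.map_cons, if_neg hc]
      exact List.cons_le_cons c ih

theorem pv_lo_le_hi (s : String) :
    PySem.Str.replace s "?" "a" ≤ PySem.Str.replace s "?" "z" := by
  rw [String.le_iff_toList_le,
      show ("?" : String) = String.ofList ['?'] from rfl,
      show ("a" : String) = String.ofList ['a'] from rfl,
      show ("z" : String) = String.ofList ['z'] from rfl,
      pv_replace_single, pv_replace_single]
  exact pv_lo_le_hi_chars s.toList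

-- countP of a prefix-true / suffix-false split
theorem pv_countP_split {α : Type} (xs : List α) (p : α → Bool) (k : Nat) (hk : k ≤ xs.length)
    (h1 : ∀ j (hj : j < xs.length), j < k → p xs[j])
    (h2 : ∀ j (hj : j < xs.length), k ≤ j → p xs[j] = false) :
    xs.countP p = k := by
  have hsplit : xs = xs.take k ++ xs.drop k := (List.take_append_drop k xs).symm
  rw [hsplit, List.countP_append]
  have htake : (xs.take k).countP p = k := by
    rw [List.countP_eq_length.mpr, List.length_take_of_le hk]
    intro a ha
    obtain ⟨j, hj, rfl⟩ := List.getElem_of_mem ha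
    have hjk : j < k := lt_of_lt_of_le hj (by simp)
    rw [List.getElem_take]
    exact h1 j (by omega) hjk
  have hdrop : (xs.drop k).countP p = 0 := by
    rw [List.countP_eq_zero]
    intro a ha
    obtain ⟨j, hj, rfl⟩ := List.getElem_of_mem ha
    rw [List.getElem_drop]
    simp only [h2 (k + j) (by simp at hj; omega) (by omega)]
    exact Bool.false_ne_true
  omega

-- sorted lists are index-monotone
theorem pv_pairwise_mono {α : Type} [Preorder α] (xs : List α)
    (hs : xs.Pairwise (· ≤ ·)) (i j : Nat) (hij : i ≤ j) (hj : j < xs.length) :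
    xs[i]'(lt_of_le_of_lt hij hj) ≤ xs[j] := by
  rcases eq_or_lt_of_le hij with rfl | h
  · exact le_refl _
  · exact List.pairwise_iff_getElem.mp hs i j (lt_of_le_of_lt hij hj) hj h

-- binary-search invariants
theorem pv_bisectLeftLoop {α : Type} [LinearOrder α] (xs : List α) (x : α) :
    ∀ (fuel lo hi : Nat), xs.Pairwise (· ≤ ·) → lo ≤ hi → hi ≤ xs.length → hi - lo ≤ fuel →
    (∀ j (hj : j < xs.length), j < lo → xs[j] < x) →
    (∀ j (hj : j < xs.length), hi ≤ j → x ≤ xs[j]) →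
    PySem.List.bisectLeftLoop xs x fuel lo hi = xs.countP (fun y => decide (y < x)) := by
  intro fuel
  induction fuel with
  | zero =>
    intro lo hi hs hlohi hhile hfuel hL hR
    have : hi = lo := by omega
    subst this
    simp only [PySem.List.bisectLeftLoop]
    exact (pv_countP_split xs _ hi (by omega)
      (fun j hj hjlo => by simpa using hL j hj hjlo)
      (fun j hj hjlo => by simpa using not_lt.mpr (hR j hj hjlo))).symm
  | succ n ih =>
    intro lo hi hs hlohi hhile hfuel hL hR
    by_cases hlh : lo < hi
    · have hmlen : (lo + hi) / 2 < xs.length := by omega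
      have hget : xs[(lo + hi) / 2]? = some (xs[(lo + hi) / 2]'hmlen) :=
        List.getElem?_eq_getElem hmlen
      simp only [PySem.List.bisectLeftLoop, if_pos hlh, hget]
      by_cases hy : xs[(lo + hi) / 2]'hmlen < x
      · rw [if_pos hy]
        refine ih ((lo + hi) / 2 + 1) hi hs (by omega) hhile (by omega) ?_ hR
        intro j hj hjm
        exact lt_of_le_of_lt (pv_pairwise_mono xs hs j ((lo + hi) / 2) (by omega) hmlen) hy
      · rw [if_neg hy]
        refine ih lo ((lo + hi) / 2) hs (by omega) (by omega) (by omega) hL ?_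
        intro j hj hjm
        exact le_trans (not_lt.mp hy) (pv_pairwise_mono xs hs ((lo + hi) / 2) j hjm hj)
    · have : hi = lo := by omega
      subst this
      simp only [PySem.List.bisectLeftLoop, if_neg hlh]
      exact (pv_countP_split xs _ hi (by omega)
        (fun j hj hjlo => by simpa using hL j hj hjlo)
        (fun j hj hjlo => by simpa using not_lt.mpr (hR j hj hjlo))).symm

theorem pv_bisectRightLoop {α : Type} [LinearOrder α] (xs : List α) (x : α) :
    ∀ (fuel lo hi : Nat), xs.Pairwise (· ≤ ·) → lo ≤ hi → hi ≤ xs.length → hi - lo ≤ fuel →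
    (∀ j (hj : j < xs.length), j < lo → xs[j] ≤ x) →
    (∀ j (hj : j < xs.length), hi ≤ j → x < xs[j]) →
    PySem.List.bisectRightLoop xs x fuel lo hi = xs.countP (fun y => decide (y ≤ x)) := by
  intro fuel
  induction fuel with
  | zero =>
    intro lo hi hs hlohi hhile hfuel hL hR
    have : hi = lo := by omega
    subst this
    simp only [PySem.List.bisectRightLoop]
    exact (pv_countP_split xs _ hi (by omega)
      (fun j hj hjlo => by simpa using hL j hj hjlo)
      (fun j hj hjlo => by simpa using not_le.mpr (hR j hj hjlo))).symm
  | succ n ih =>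
    intro lo hi hs hlohi hhile hfuel hL hR
    by_cases hlh : lo < hi
    · have hmlen : (lo + hi) / 2 < xs.length := by omega
      have hget : xs[(lo + hi) / 2]? = some (xs[(lo + hi) / 2]'hmlen) :=
        List.getElem?_eq_getElem hmlen
      simp only [PySem.List.bisectRightLoop, if_pos hlh, hget]
      by_cases hy : x < xs[(lo + hi) / 2]'hmlen
      · rw [if_pos hy]
        refine ih lo ((lo + hi) / 2) hs (by omega) (by omega) (by omega) hL ?_
        intro j hj hjm
        exact lt_of_lt_of_le hy (pv_pairwise_mono xs hs ((lo + hi) / 2) j hjm hj)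
      · rw [if_neg hy]
        refine ih ((lo + hi) / 2 + 1) hi hs (by omega) hhile (by omega) ?_ hR
        intro j hj hjm
        exact le_trans (pv_pairwise_mono xs hs j ((lo + hi) / 2) (by omega) hmlen) (not_lt.mp hy)
    · have : hi = lo := by omega
      subst this
      simp only [PySem.List.bisectRightLoop, if_neg hlh]
      exact (pv_countP_split xs _ hi (by omega)
        (fun j hj hjlo => by simpa using hL j hj hjlo)
        (fun j hj hjlo => by simpa using not_le.mpr (hR j hj hjlo))).symm

theorem pv_bisectLeft {α : Type} [LinearOrder α] (xs : List α) (x : α) (hs : xs.Pairwise (· ≤ ·)) :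
    PySem.List.bisectLeft xs x = xs.countP (fun y => decide (y < x)) := by
  exact pv_bisectLeftLoop xs x xs.length 0 xs.length hs (Nat.zero_le _) le_rfl (by omega)
    (by omega) (by omega)

theorem pv_bisectRight {α : Type} [LinearOrder α] (xs : List α) (x : α) (hs : xs.Pairwise (· ≤ ·)) :
    PySem.List.bisectRight xs x = xs.countP (fun y => decide (y ≤ x)) := by
  exact pv_bisectRightLoop xs x xs.length 0 xs.length hs (Nat.zero_le _) le_rfl (by omega)
    (by omega) (by omega)

-- countP arithmetic:  #{y ≤ hi} = #{lo ≤ y ≤ hi} + #{y < lo}  when lo ≤ hi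
theorem pv_countP_range {α : Type} [LinearOrder α] (xs : List α) (lo hi : α) (h : lo ≤ hi) :
    xs.countP (fun y => decide (y ≤ hi))
      = xs.countP (fun y => decide (lo ≤ y ∧ y ≤ hi)) + xs.countP (fun y => decide (y < lo)) := by
  induction xs with
  | nil => rfl
  | cons a t ih =>
    simp only [List.countP_cons, ih]
    by_cases h1 : a < lo
    · have : a ≤ hi := le_of_lt (lt_of_lt_of_le h1 h)
      simp [h1, this, not_le.mpr h1]; omega
    · by_cases h2 : a ≤ hi
      · simp [h1, h2, not_lt.mp h1]; omega
      · simp [h1, h2]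

-- the count through sorted buckets and bisect equals the direct range count
theorem pv_count_eq (bucket : List String) (lo hi : String) (hlohi : lo ≤ hi) :
    pvCountByRange (PySem.List.sorted bucket (fun x => x) false) lo hi
      = ((bucket.countP (fun k => decide (lo ≤ k ∧ k ≤ hi)) : Nat) : Int) := by
  have hs : (PySem.List.sorted bucket (fun x => x) false).Pairwise (· ≤ ·) := by
    simpa using PySem.List.sorted_pairwise bucket (fun x => x)
  have hperm := PySem.List.sorted_perm bucket (fun x => x) false
  unfold pvCountByRange
  rw [pv_bisectLeft _ _ hs, pv_bisectRight _ _ hs, hperm.countP_eq, hperm.countP_eq,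
      pv_countP_range bucket lo hi hlohi]
  push_cast
  ring

-- getD after set
theorem pv_getD_set {α : Type} (l : List α) (i : Nat) (v d : α) (hi : i < l.length) (j : Nat) :
    (l.set i v).getD j d = if i = j then v else l.getD j d := by
  by_cases hij : i = j
  · subst hij
    simp [List.getD_eq_getElem?_getD, hi]
  · simp [List.getD_eq_getElem?_getD, hij]

-- the word-bucketing fold preserves the array length
theorem pv_build_len (key : String → String) (ws : List String) (A : List (List String)) :
    (ws.foldl (fun a w => PySem.List.pySetD a (PySem.Str.len w)
        (PySem.List.pyGetD a (PySem.Str.len w) [] ++ [key w])) A).length = A.length := by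
  induction ws generalizing A with
  | nil => rfl
  | cons w t ih =>
    rw [List.foldl_cons, ih]
    simp [PySem.Str.len]

-- the word-bucketing fold: final bucket j holds A[j] ++ the keys of the words of length j, in order
theorem pv_build_get (key : String → String) (ws : List String) (A : List (List String))
    (hA : A.length = 10001) (j : Nat) (hj : j < 10001) :
    (ws.foldl (fun a w => PySem.List.pySetD a (PySem.Str.len w)
        (PySem.List.pyGetD a (PySem.Str.len w) [] ++ [key w])) A).getD j []
      = A.getD j [] ++ ((ws.filter (fun w => w.length == j)).map key) := by
  induction ws generalizing A with
  | nil => simp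
  | cons w t ih =>
    have hstep : PySem.List.pySetD A (PySem.Str.len w)
        (PySem.List.pyGetD A (PySem.Str.len w) [] ++ [key w])
        = A.set w.length (A.getD w.length [] ++ [key w]) := by
      simp [PySem.Str.len]
    rw [List.foldl_cons, hstep]
    by_cases hwlen : w.length < 10001
    · rw [ih _ (by simpa using hA)]
      rw [pv_getD_set _ _ _ _ (by omega) j]
      by_cases hjn : w.length = j
      · simp [hjn]
      · simp [hjn]
    · -- out-of-range word: Python would raise; the set is a no-op here
      have hset : A.set w.length (A.getD w.length [] ++ [key w]) = A := by
        apply List.set_eq_of_length_le; omega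
      rw [hset, ih _ hA]
      have : (w.length == j) = false := by simp; omega
      simp [this]

-- the sorting fold: every bucket whose index occurs in idxs gets sorted, the rest are untouched
theorem pv_sort_get (idxs : List Int) (A : List (List String)) (j : Nat)
    (h : ∀ i ∈ idxs, 0 ≤ i ∧ i.toNat < A.length) :
    (idxs.foldl (fun a i => PySem.List.pySetD a i
        (PySem.List.sorted (PySem.List.pyGetD a i []) (fun x => x) false)) A).getD j []
      = if (j : Int) ∈ idxs then PySem.List.sorted (A.getD j []) (fun x => x) false
        else A.getD j [] := by
  induction idxs generalizing A with
  | nil => simp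
  | cons i t ih =>
    obtain ⟨hi0, hilen⟩ := h i List.mem_cons_self
    have hieq : i = ((i.toNat : Nat) : Int) := (Int.toNat_of_nonneg hi0).symm
    rw [List.foldl_cons, hieq, PySem.List.pySetD_natCast, PySem.List.pyGetD_natCast]
    rw [ih _ (fun x hx => by
          have := h x (List.mem_cons_of_mem i hx)
          simpa [List.length_set] using this)]
    rw [pv_getD_set _ _ _ _ hilen j]
    by_cases hji : (j : Int) ∈ t
    · simp only [hji, if_true, List.mem_cons]
      by_cases hij : i.toNat = j
      · simp [hij, PySem.List.sorted_sorted]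
      · simp [hij]
    · by_cases hij : i.toNat = j
      · have : (j : Int) = i := by omega
        simp [hji, hij, List.mem_cons, this]
      · have : ¬ (j : Int) = i := by omega
        simp [hji, hij, List.mem_cons, this, Int.toNat_of_nonneg hi0]

-- the build loop acts independently on the two bucket arrays
theorem pv_split_build (ws : List String) (a b : List (List String)) :
    ws.foldl (fun st word =>
      (PySem.List.pySetD st.1 (PySem.Str.len word)
          (PySem.List.pyGetD st.1 (PySem.Str.len word) [] ++ [word]),
       PySem.List.pySetD st.2 (PySem.Str.len word)
          (PySem.List.pyGetD st.2 (PySem.Str.len word) [] ++ [pvRev word]))) (a, b)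
    = (ws.foldl (fun x word => PySem.List.pySetD x (PySem.Str.len word)
          (PySem.List.pyGetD x (PySem.Str.len word) [] ++ [word])) a,
       ws.foldl (fun x word => PySem.List.pySetD x (PySem.Str.len word)
          (PySem.List.pyGetD x (PySem.Str.len word) [] ++ [pvRev word])) b) :=
  pv_foldl_pair ws
    (fun x word => PySem.List.pySetD x (PySem.Str.len word)
        (PySem.List.pyGetD x (PySem.Str.len word) [] ++ [word]))
    (fun x word => PySem.List.pySetD x (PySem.Str.len word)
        (PySem.List.pyGetD x (PySem.Str.len word) [] ++ [pvRev word])) a b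

-- the sorting loop acts independently on the two bucket arrays
theorem pv_split_sort (idxs : List Int) (a b : List (List String)) :
    idxs.foldl (fun st i =>
      (PySem.List.pySetD st.1 i (PySem.List.sorted (PySem.List.pyGetD st.1 i []) (fun x => x) false),
       PySem.List.pySetD st.2 i (PySem.List.sorted (PySem.List.pyGetD st.2 i []) (fun x => x) false))) (a, b)
    = (idxs.foldl (fun x i => PySem.List.pySetD x i
          (PySem.List.sorted (PySem.List.pyGetD x i []) (fun x => x) false)) a,
       idxs.foldl (fun x i => PySem.List.pySetD x i
          (PySem.List.sorted (PySem.List.pyGetD x i []) (fun x => x) false)) b) :=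
  pv_foldl_pair idxs
    (fun x i => PySem.List.pySetD x i
        (PySem.List.sorted (PySem.List.pyGetD x i []) (fun x => x) false))
    (fun x i => PySem.List.pySetD x i
        (PySem.List.sorted (PySem.List.pyGetD x i []) (fun x => x) false)) a b

-- the answer-accumulating loop is a map
theorem pv_foldl_branch_append {γ : Type} (l : List γ) (c : γ → Prop) [DecidablePred c]
    (F G : γ → Int) (acc : List Int) :
    l.foldl (fun ans q => if c q then ans ++ [F q] else ans ++ [G q]) acc
      = acc ++ l.map (fun q => if c q then F q else G q) := by
  induction l generalizing acc with
  | nil => simp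
  | cons x t ih => by_cases hc : c x <;> simp [hc, ih]

-- ===== VERDICT (by name: the statement is the Claim_ definition above) =====
set_option maxRecDepth 16384 in
theorem solution_spec : Claim_equal_solution := by
  intro words queries hdom hpre
  obtain ⟨hw, hq⟩ := hpre
  unfold Spec_solution
  simp only [solution, solution_alt]
  rw [pv_split_build, pv_split_sort,
      pv_foldl_branch_append queries (fun q => PySem.Str.pyGet? q 0 = some '?')]
  rw [List.nil_append]
  apply List.map_congr_left
  intro q hq'
  obtain ⟨hqne, hqlen⟩ := hq q hq'
  have harr0len : ((PySem.List.pyRange 0 10001 1).map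
      (fun _ => ([] : List String))).length = 10001 := by
    rw [List.length_map, PySem.List.length_pyRange_one]
    rfl
  have harr0get : ∀ j : Nat, (((PySem.List.pyRange 0 10001 1).map
      (fun _ => ([] : List String))).getD j []) = [] := by
    intro j
    simp only [List.getD_eq_getElem?_getD, List.getElem?_map]
    cases (PySem.List.pyRange 0 10001 1)[j]? <;> simp
  have hn : q.toList.length ≤ 10000 := hqlen
  -- a reusable computation of one bucket after build + sort
  have hbucket : ∀ key : String → String,
      (PySem.List.pyGetD
        ((PySem.List.pyRange 0 10001 1).foldl (fun a i => PySem.List.pySetD a i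
            (PySem.List.sorted (PySem.List.pyGetD a i []) (fun x => x) false))
          (words.foldl (fun a w => PySem.List.pySetD a (PySem.Str.len w)
              (PySem.List.pyGetD a (PySem.Str.len w) [] ++ [key w]))
            ((PySem.List.pyRange 0 10001 1).map (fun _ => ([] : List String)))))
        (PySem.Str.len q) [])
      = PySem.List.sorted
          ((words.filter (fun w => w.toList.length == q.toList.length)).map key)
          (fun x => x) false := by
    intro key
    have hblen : (words.foldl (fun a w => PySem.List.pySetD a (PySem.Str.len w)
        (PySem.List.pyGetD a (PySem.Str.len w) [] ++ [key w]))
        ((PySem.List.pyRange 0 10001 1).map (fun _ => ([] : List String)))).length = 10001 := by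
      rw [pv_build_len, harr0len]
    rw [show PySem.Str.len q = ((q.toList.length : Nat) : Int) from rfl,
        PySem.List.pyGetD_natCast]
    rw [pv_sort_get _ _ q.toList.length (fun i hi => by
          rw [hblen]
          have := PySem.List.mem_pyRange_one.mp hi
          omega)]
    rw [if_pos (PySem.List.mem_pyRange_one.mpr (by constructor <;> [positivity; exact_mod_cast by omega]))]
    rw [pv_build_get key words _ (by rw [harr0len]) q.toList.length (by omega), harr0get]
    simp [String.length_toList]
  by_cases hc : PySem.Str.pyGet? q 0 = some '?'
  · rw [if_pos hc, hbucket pvRev]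
    simp only [pvWcCount]
    rw [if_pos hc, pv_count_eq _ _ _ (pv_lo_le_hi (pvRev q))]
    congr 2
    refine congrArg _ (List.filter_congr ?_)
    intro w _
    simp [PySem.Str.len]
  · rw [if_neg hc, hbucket (fun w => w)]
    simp only [pvWcCount]
    rw [if_neg hc, pv_count_eq _ _ _ (pv_lo_le_hi q)]
    congr 2
    rw [List.map_id']
    apply List.filter_congr
    intro w _
    simp [PySem.Str.len]
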